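-- pv_equiv track=rewrite | github.com/mahdiarn/Tugas-Kecil-1-Kriptografi | tes.py | perLimaHuruf
-- ===== SOURCE A (Python) =====
-- def perLimaHuruf(masukan):
--     raw = ""
--     idx = 0
--     while (idx != len(masukan)):
--         if(masukan[idx] != " "):
--             raw = raw + masukan[idx]
--         idx += 1
--     output = ""
--     idx = 0
--     count = 0
--     while (idx != len(raw)):
--         if(raw[idx] != " "):
--             output = output + raw[idx]
--         idx += 1
--         if(count == 4):
--             output += " "
--         count += 1
--         count = count % 5
--     return output
-- ===== SOURCE B (Python) =====
-- def perLimaHuruf(masukan):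
--     raw = "".join(ch for ch in masukan if ch != " ")
--     parts = []
--     for i in range(0, len(raw), 5):
--         blok = raw[i:i+5]
--         parts.append(blok + " " if len(blok) == 5 else blok)
--     return "".join(parts)
-- ===== Notes on version B (the rewrite author's own statement) =====
-- stated objective: faster
-- what changed: B drops spaces with one filtering join and then emits the output by slicing the cleaned string into blocks of five (appending a space after each full block), replacing A's per-character loops with a modular counter and quadratic string concatenation.
import Mathlib
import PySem

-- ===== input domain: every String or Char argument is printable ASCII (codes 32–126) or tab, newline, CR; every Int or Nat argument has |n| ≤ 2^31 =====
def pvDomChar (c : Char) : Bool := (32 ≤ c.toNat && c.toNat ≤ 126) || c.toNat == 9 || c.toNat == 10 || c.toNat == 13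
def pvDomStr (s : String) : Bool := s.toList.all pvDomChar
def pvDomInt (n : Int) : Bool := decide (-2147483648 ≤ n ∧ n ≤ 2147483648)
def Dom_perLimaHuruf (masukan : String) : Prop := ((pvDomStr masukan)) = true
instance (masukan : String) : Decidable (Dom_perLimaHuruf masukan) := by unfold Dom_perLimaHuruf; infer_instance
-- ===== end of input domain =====

-- B regroups the cleaned string by slicing blocks of five instead of A's per-character counter loop (simpler);
-- equivalence of the return value is proved on all of Dom.

-- ===== PORT A =====
-- first while loop: append each non-space character to raw
def pvALoop1 (chars : List Char) : List Char :=
  chars.foldl (fun raw c => if c ≠ ' ' then raw ++ [c] else raw) []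

-- second while loop: state (output, count); append non-space char, add ' ' when count = 4, count := (count+1) % 5
def pvALoop2 : List Char → List Char → Nat → List Char
  | [], output, _ => output
  | c :: rest, output, count =>
      let output1 := if c ≠ ' ' then output ++ [c] else output
      let output2 := if count = 4 then output1 ++ [' '] else output1
      pvALoop2 rest output2 ((count + 1) % 5)

def perLimaHuruf (masukan : String) : String :=
  String.ofList (pvALoop2 (pvALoop1 masukan.toList) [] 0)

-- ===== PORT B =====
-- for i in range(0,len(raw),5): blok = raw[i:i+5]; emit blok + " " if len(blok)==5 else blok
def pvBChunks (l : List Char) : List Char :=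
  if _h : l = [] then []
  else
    (l.take 5 ++ (if (l.take 5).length = 5 then [' '] else [])) ++ pvBChunks (l.drop 5)
termination_by l.length
decreasing_by
  have : l.length ≠ 0 := by simpa using _h
  simp [List.length_drop]; omega

def perLimaHuruf_alt (masukan : String) : String :=
  String.ofList (pvBChunks (masukan.toList.filter (fun ch => ch ≠ ' ')))

-- ===== PRECONDITION & SPEC =====
def Spec_perLimaHuruf (masukan : String) (out : String) : Prop := out = perLimaHuruf_alt masukan
instance (masukan : String) (out : String) : Decidable (Spec_perLimaHuruf masukan out) := by unfold Spec_perLimaHuruf; infer_instance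

-- ===== CLAIM (what is proved, stated in full; the proofs are below) =====
def Claim_equal_perLimaHuruf : Prop := ∀ (masukan : String), Dom_perLimaHuruf masukan → Spec_perLimaHuruf masukan (perLimaHuruf masukan)

-- ===== LEMMAS AND PROOFS =====

theorem pvALoop1_go (chars : List Char) (acc : List Char) :
    chars.foldl (fun raw c => if c ≠ ' ' then raw ++ [c] else raw) acc
      = acc ++ chars.filter (fun c => c ≠ ' ') := by
  induction chars generalizing acc with
  | nil => simp
  | cons c rest ih =>
    rw [List.foldl_cons, ih, List.filter_cons]
    by_cases hc : c = ' ' <;> simp [hc]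

theorem pvALoop1_eq_filter (chars : List Char) :
    pvALoop1 chars = chars.filter (fun c => c ≠ ' ') := by
  simpa [pvALoop1] using pvALoop1_go chars []

theorem pvALoop2_nospace (l : List Char) (out : List Char)
    (h : ∀ c ∈ l, c ≠ ' ') : pvALoop2 l out 0 = out ++ pvBChunks l := by
  induction l using pvBChunks.induct generalizing out with
  | case1 => simp_all [pvALoop2, pvBChunks]
  | case2 l hl ih =>
    match l, hl with
    | c1 :: rest1, _ =>
      have h1 : c1 ≠ ' ' := h c1 (by simp)
      match rest1 with
      | [] => simp [pvALoop2, pvBChunks, h1]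
      | c2 :: rest2 =>
        have h2 : c2 ≠ ' ' := h c2 (by simp)
        match rest2 with
        | [] => simp [pvALoop2, pvBChunks, h1, h2]
        | c3 :: rest3 =>
          have h3 : c3 ≠ ' ' := h c3 (by simp)
          match rest3 with
          | [] => simp [pvALoop2, pvBChunks, h1, h2, h3]
          | c4 :: rest4 =>
            have h4 : c4 ≠ ' ' := h c4 (by simp)
            match rest4 with
            | [] => simp [pvALoop2, pvBChunks, h1, h2, h3, h4]
            | c5 :: rest5 =>
              have h5 : c5 ≠ ' ' := h c5 (by simp)
              have hrec := ih (out := out ++ [c1, c2, c3, c4, c5, ' '])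
                (by intro c hc
                    have hc' : c ∈ rest5 := by simpa using hc
                    exact h c (by simp [hc']))
              simp only [pvALoop2, h1, h2, h3, h4, h5, if_pos, ne_eq,
                not_false_eq_true] at *
              rw [show ((0:Nat)+1)%5 = 1 by norm_num] at *
              simp at hrec ⊢
              rw [hrec]
              conv_rhs => rw [pvBChunks]
              simp

-- ===== VERDICT (by name: the statement is the Claim_ definition above) =====
theorem perLimaHuruf_spec : Claim_equal_perLimaHuruf := by
  intro masukan _
  unfold Spec_perLimaHuruf perLimaHuruf perLimaHuruf_alt
  rw [pvALoop1_eq_filter]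
  rw [pvALoop2_nospace]
  · simp
  · intro c hc
    simpa using (List.of_mem_filter hc)
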